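-- pv_equiv track=rewrite | github.com/Reinsdyret/uib-notes | INF100/Oppgaver/kattis/parking2.py | handle_case
-- ===== SOURCE A (Python) =====
-- def handle_case(parkings:list) -> int:
--     distanse = 0
--     sorted_parkings = sorted(parkings)
--     parking_slot = int(round(sorted_parkings[-1] + sorted_parkings[0]) /2)
--     distanse += parking_slot -  sorted_parkings[0] + sorted_parkings[-1] - parking_slot
--     for i in range(1,len(sorted_parkings)):
--         distanse += sorted_parkings[i] - sorted_parkings[i-1]
--     return distanse
-- ===== SOURCE B (Python) =====
-- def handle_case(parkings: list) -> int:
--     lo = hi = parkings[0]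
--     for x in parkings[1:]:
--         if x < lo:
--             lo = x
--         if x > hi:
--             hi = x
--     return 2 * (hi - lo)
-- ===== Notes on version B (the rewrite author's own statement) =====
-- stated objective: faster
-- what changed: Replaced sort + telescoping sum of consecutive gaps (plus a cancelling midpoint term) by a single scan maintaining running min and max, returning 2*(max-min).
import Mathlib
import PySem

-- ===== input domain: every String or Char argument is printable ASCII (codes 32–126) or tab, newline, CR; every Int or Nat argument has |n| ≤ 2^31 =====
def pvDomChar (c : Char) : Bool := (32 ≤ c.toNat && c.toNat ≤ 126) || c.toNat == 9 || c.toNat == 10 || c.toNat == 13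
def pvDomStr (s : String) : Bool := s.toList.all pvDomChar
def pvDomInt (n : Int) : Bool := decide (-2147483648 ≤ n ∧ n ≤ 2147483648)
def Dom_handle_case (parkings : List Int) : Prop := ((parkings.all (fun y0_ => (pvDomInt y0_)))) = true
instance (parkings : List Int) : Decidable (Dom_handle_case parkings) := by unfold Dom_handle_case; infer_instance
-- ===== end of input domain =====

-- B replaces A's sort + telescoping gap sum by a single min/max scan (O(n) vs O(n log n)); a timing run measured it faster.

-- ===== PORT A =====
-- sorted_parkings[-1] / [0] are pyGet?; int(round(s)/2) is exact truncation toward zero on Dom, ported as Int.tdiv.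
def handle_case (parkings : List Int) : Int :=
  let sorted_parkings := PySem.List.sorted parkings (fun x => x) false
  match PySem.List.pyGet? sorted_parkings (-1), PySem.List.pyGet? sorted_parkings 0 with
  | some slast, some s0 =>
    let parking_slot := Int.tdiv (slast + s0) 2
    let distanse := 0 + (parking_slot - s0 + slast - parking_slot)
    (PySem.List.pyRange 1 (sorted_parkings.length : Int) 1).foldl
      (fun d i => d + (PySem.List.pyGetD sorted_parkings i 0
                       - PySem.List.pyGetD sorted_parkings (i - 1) 0)) distanse
  | _, _ => 0  -- IndexError on the empty list; excluded by Pre_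

-- ===== PORT B =====
def handle_case_alt (parkings : List Int) : Int :=
  match parkings with
  | [] => 0  -- IndexError in Python; excluded by Pre_
  | h :: t =>
    let p := t.foldl (fun (p : Int × Int) x =>
      (if x < p.1 then x else p.1, if x > p.2 then x else p.2)) (h, h)
    2 * (p.2 - p.1)

-- ===== PRECONDITION & SPEC =====
-- Both Pythons raise IndexError on the empty list; Pre_ excludes exactly it.
def Pre_handle_case (parkings : List Int) : Prop := parkings ≠ []
instance (parkings : List Int) : Decidable (Pre_handle_case parkings) := by
  unfold Pre_handle_case; infer_instance
def pvWitness_handle_case : List Int := [3, 1, 2]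

def Spec_handle_case (parkings : List Int) (out : Int) : Prop := out = handle_case_alt parkings
instance (parkings : List Int) (out : Int) : Decidable (Spec_handle_case parkings out) := by
  unfold Spec_handle_case; infer_instance

-- ===== CLAIM (what is proved, stated in full; the proofs are below) =====
def Claim_equal_handle_case : Prop := ∀ (parkings : List Int), Dom_handle_case parkings → Pre_handle_case parkings → Spec_handle_case parkings (handle_case parkings)

-- ===== LEMMAS AND PROOFS =====

-- B's fold computes the pair (foldl min, foldl max).
theorem pv_fold_pair (t : List Int) (a b : Int) :
    t.foldl (fun (p : Int × Int) x =>
      (if x < p.1 then x else p.1, if x > p.2 then x else p.2)) (a, b)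
      = (t.foldl min a, t.foldl max b) := by
  induction t generalizing a b with
  | nil => rfl
  | cons x t ih =>
      simp only [List.foldl_cons, ih]
      congr 1 <;> congr 1 <;> omega

-- min over a list is permutation-invariant.
theorem pv_foldl_min_perm {l₁ l₂ : List Int} (h : l₁.Perm l₂) (a : Int) :
    l₁.foldl min a = l₂.foldl min a :=
  h.foldl_eq' (fun x _ y _ z => by omega) a

theorem pv_foldl_max_perm {l₁ l₂ : List Int} (h : l₁.Perm l₂) (a : Int) :
    l₁.foldl max a = l₂.foldl max a :=
  h.foldl_eq' (fun x _ y _ z => by omega) a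

-- On a ≤-sorted list m :: u, min is the head …
theorem pv_foldl_min_sorted (u : List Int) (m : Int)
    (h : ∀ x ∈ u, m ≤ x) : u.foldl min m = m := by
  induction u generalizing m with
  | nil => rfl
  | cons x u ih =>
      have hx : m ≤ x := h x (by simp)
      simp only [List.foldl_cons, show min m x = m by omega]
      exact ih m (fun y hy => h y (by simp [hy]))

-- every element of a ≤-sorted list is ≤ its last element
theorem pv_le_getLast (l : List Int) (hne : l ≠ []) (hpw : l.Pairwise (· ≤ ·)) :
    ∀ x ∈ l, x ≤ l.getLast hne := by
  induction l with
  | nil => simp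
  | cons a t ih =>
      intro x hx
      cases t with
      | nil => simp_all
      | cons b t' =>
          rw [List.getLast_cons (by simp)]
          rcases List.mem_cons.mp hx with rfl | hx'
          · have hmem := List.getLast_mem (l := b :: t') (by simp)
            exact le_trans ((List.pairwise_cons.mp hpw).1 _ hmem) (le_refl _)
          · exact ih (by simp) (List.pairwise_cons.mp hpw).2 x hx'

-- folding max from a value between min and max of a sorted list gives the last element
theorem pv_foldl_max_between (u : List Int) (m a : Int)
    (hpw : (m :: u).Pairwise (· ≤ ·)) (h1 : m ≤ a)
    (h2 : a ≤ (m :: u).getLast (by simp)) :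
    u.foldl max a = (m :: u).getLast (by simp) := by
  induction u generalizing m a with
  | nil => simp_all; omega
  | cons x u ih =>
      have hmx : m ≤ x := (List.pairwise_cons.mp hpw).1 x (by simp)
      have hpw' : (x :: u).Pairwise (· ≤ ·) := (List.pairwise_cons.mp hpw).2
      rw [List.getLast_cons (by simp)] at h2 ⊢
      simp only [List.foldl_cons]
      refine ih x (max a x) hpw' (by omega) ?_
      have hxle := pv_le_getLast (x :: u) (by simp) hpw' x (by simp)
      omega

-- A's telescoping loop: summing consecutive gaps of s over range(1, n) gives s[n-1] - s[0].
theorem pv_telescope (s : List Int) (d : Int) (n : Nat) (h1 : 1 ≤ n) (hn : n ≤ s.length) :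
    (PySem.List.pyRange 1 (n : Int) 1).foldl
      (fun d i => d + (PySem.List.pyGetD s i 0 - PySem.List.pyGetD s (i - 1) 0)) d
      = d + (s.getD (n - 1) 0 - s.getD 0 0) := by
  induction n with
  | zero => omega
  | succ k ih =>
      by_cases hk : 1 ≤ k
      · have hsplit : PySem.List.pyRange 1 ((k : Int) + 1) 1
            = PySem.List.pyRange 1 (k : Int) 1 ++ [(k : Int)] :=
          PySem.List.pyRange_one_succ_right (by omega)
        have hc : ((k + 1 : Nat) : Int) = (k : Int) + 1 := by push_cast; ring
        rw [hc, hsplit, List.foldl_append, ih hk (by omega)]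
        have e1 : PySem.List.pyGetD s (k : Int) 0 = s.getD k 0 := by
          simp [PySem.List.pyGetD_natCast]
        have e2 : PySem.List.pyGetD s ((k : Int) - 1) 0 = s.getD (k - 1) 0 := by
          have : ((k : Int) - 1) = ((k - 1 : Nat) : Int) := by omega
          rw [this]; simp [PySem.List.pyGetD_natCast]
        simp only [List.foldl_cons, List.foldl_nil, e1, e2, Nat.add_sub_cancel]
        ring
      · have hk0 : k = 0 := by omega
        subst hk0
        simp [PySem.List.pyRange_one_eq_nil (by omega : (1:Int) ≤ 1)]

-- sorted preserves nonemptiness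
theorem pv_sorted_ne_nil (xs : List Int) (h : xs ≠ []) :
    PySem.List.sorted xs (fun x => x) false ≠ [] := by
  intro hc
  have hperm : (PySem.List.sorted xs (fun x => x) false).Perm xs := PySem.List.sorted_perm _ _ _
  rw [hc] at hperm
  exact h (hperm.symm.eq_nil)

-- handle_case on a nonempty list equals 2 * (last - head) of the sorted list.
theorem pv_handle_case_eq (parkings : List Int) (hne : parkings ≠ []) :
    handle_case parkings
      = 2 * ((PySem.List.sorted parkings (fun x => x) false).getLast
               (pv_sorted_ne_nil parkings hne)
           - (PySem.List.sorted parkings (fun x => x) false).head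
               (pv_sorted_ne_nil parkings hne)) := by
  have hsne := pv_sorted_ne_nil parkings hne
  obtain ⟨m, u, hsu⟩ := List.exists_cons_of_ne_nil hsne
  unfold handle_case
  have hL : (m :: u).getLast? = some ((m :: u).getLast (by simp)) :=
    List.getLast?_eq_some_getLast (by simp)
  simp only [hsu, PySem.List.pyGet?_neg_one, PySem.List.pyGet?_zero_cons, hL]
  rw [pv_telescope (m :: u) _ (m :: u).length (by simp) le_rfl]
  have h0 : (m :: u).getD 0 0 = m := rfl
  have hl : (m :: u).getD ((m :: u).length - 1) 0 = (m :: u).getLast (by simp) := by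
    rw [List.getLast_eq_getElem, List.getD_eq_getElem (m :: u) 0 (by simp)]
    rfl
  rw [h0, hl]
  simp only [List.head_cons]
  ring

-- ===== VERDICT (by name: the statement is the Claim_ definition above) =====
theorem handle_case_spec : Claim_equal_handle_case := by
  intro parkings _ hpre
  unfold Spec_handle_case
  obtain ⟨h, t, rfl⟩ := List.exists_cons_of_ne_nil hpre
  rw [pv_handle_case_eq _ hpre]
  unfold handle_case_alt
  simp only [pv_fold_pair]
  have hsne : PySem.List.sorted (h :: t) (fun x => x) false ≠ [] :=
    pv_sorted_ne_nil _ hpre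
  have hperm : (PySem.List.sorted (h :: t) (fun x => x) false).Perm (h :: t) :=
    PySem.List.sorted_perm _ _ _
  have hpw : (PySem.List.sorted (h :: t) (fun x => x) false).Pairwise (· ≤ ·) :=
    PySem.List.sorted_pairwise (xs := h :: t) (key := fun x => x)
  obtain ⟨m, u, hsu⟩ := List.exists_cons_of_ne_nil hsne
  rw [hsu] at hperm hpw
  have hmh : m ≤ h := by
    have hin : h ∈ m :: u := hperm.mem_iff.mpr (by simp)
    rcases List.mem_cons.mp hin with rfl | hmem
    · omega
    · exact (List.pairwise_cons.mp hpw).1 h hmem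
  have hle : ∀ x ∈ m :: u, x ≤ (m :: u).getLast (by simp) :=
    pv_le_getLast (m :: u) (by simp) hpw
  have hmin : t.foldl min h = m := by
    have h1 : (h :: t).foldl min h = (m :: u).foldl min h := pv_foldl_min_perm hperm.symm h
    have h2 : (m :: u).foldl min h = m := by
      simp only [List.foldl_cons, show min h m = m by omega]
      exact pv_foldl_min_sorted u m (List.pairwise_cons.mp hpw).1
    have h3 : (h :: t).foldl min h = t.foldl min h := by
      simp
    omega
  have hmax : t.foldl max h = (m :: u).getLast (by simp) := by
    have h1 : (h :: t).foldl max h = (m :: u).foldl max h := pv_foldl_max_perm hperm.symm h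
    have h2 : (m :: u).foldl max h = (m :: u).getLast (by simp) := by
      simp only [List.foldl_cons, show max h m = h by omega]
      exact pv_foldl_max_between u m h hpw hmh (hle h (hperm.mem_iff.mpr (by simp)))
    have h3 : (h :: t).foldl max h = t.foldl max h := by
      simp
    omega
  simp only [hsu, hmin, hmax, List.head_cons]
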